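-- pv_equiv track=rewrite | github.com/Minus0149/ai-agent | automation_configs.py | optimize_config_for_task
-- ===== SOURCE A (Python) =====
-- def optimize_config_for_task(task_description: str) -> str:
--     """Recommend the best configuration for a given task."""
--     task_lower = task_description.lower()
--
--     # Speed-focused keywords
--     if any(keyword in task_lower for keyword in ['fast', 'quick', 'speed', 'batch', 'bulk']):
--         return "fast_automation"
--
--     # Stealth keywords
--     elif any(keyword in task_lower for keyword in ['stealth', 'undetected', 'bypass', 'avoid detection']):
--         return "stealth_automation"
--
--     # Data extraction keywords
--     elif any(keyword in task_lower for keyword in ['scrape', 'extract', 'collect', 'harvest', 'data']):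
--         return "data_extraction"
--
--     # Form keywords
--     elif any(keyword in task_lower for keyword in ['form', 'fill', 'submit', 'register', 'signup']):
--         return "form_automation"
--
--     # E-commerce keywords
--     elif any(keyword in task_lower for keyword in ['buy', 'shop', 'product', 'cart', 'price']):
--         return "ecommerce_automation"
--
--     # Social media keywords
--     elif any(keyword in task_lower for keyword in ['social', 'post', 'tweet', 'facebook', 'instagram']):
--         return "social_media_automation"
--
--     # Testing keywords
--     elif any(keyword in task_lower for keyword in ['test', 'verify', 'check', 'validate', 'qa']):
--         return "testing_automation"
--
--     # Default to visual for debugging and general use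
--     else:
--         return "visual_automation"
-- ===== SOURCE B (Python) =====
-- # Text-driven scan: sweep the lowered string left to right once; at each position,
-- # record the highest-priority (lowest-index) rule whose keyword starts there.
-- _CONFIGS = ["fast_automation", "stealth_automation", "data_extraction",
--             "form_automation", "ecommerce_automation", "social_media_automation",
--             "testing_automation"]
--
-- _KEYWORDS = [("fast", 0), ("quick", 0), ("speed", 0), ("batch", 0), ("bulk", 0),
--              ("stealth", 1), ("undetected", 1), ("bypass", 1), ("avoid detection", 1),
--              ("scrape", 2), ("extract", 2), ("collect", 2), ("harvest", 2), ("data", 2),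
--              ("form", 3), ("fill", 3), ("submit", 3), ("register", 3), ("signup", 3),
--              ("buy", 4), ("shop", 4), ("product", 4), ("cart", 4), ("price", 4),
--              ("social", 5), ("post", 5), ("tweet", 5), ("facebook", 5), ("instagram", 5),
--              ("test", 6), ("verify", 6), ("check", 6), ("validate", 6), ("qa", 6)]
--
-- def optimize_config_for_task(task_description: str) -> str:
--     task_lower = task_description.lower()
--     best = 7  # sentinel: no rule matched yet
--     for pos in range(len(task_lower)):
--         for kw, i in _KEYWORDS:
--             if task_lower.startswith(kw, pos):
--                 best = min(best, i)
--     return _CONFIGS[best] if best < 7 else "visual_automation"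
-- ===== Notes on version B (the rewrite author's own statement) =====
-- stated objective: alternative
-- what changed: Replaces the rule-driven if/elif chain of substring searches with a single left-to-right sweep over the lowered text: at each position it checks which keywords start there and keeps the minimum rule index found, indexing into a config table at the end.
import Mathlib
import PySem

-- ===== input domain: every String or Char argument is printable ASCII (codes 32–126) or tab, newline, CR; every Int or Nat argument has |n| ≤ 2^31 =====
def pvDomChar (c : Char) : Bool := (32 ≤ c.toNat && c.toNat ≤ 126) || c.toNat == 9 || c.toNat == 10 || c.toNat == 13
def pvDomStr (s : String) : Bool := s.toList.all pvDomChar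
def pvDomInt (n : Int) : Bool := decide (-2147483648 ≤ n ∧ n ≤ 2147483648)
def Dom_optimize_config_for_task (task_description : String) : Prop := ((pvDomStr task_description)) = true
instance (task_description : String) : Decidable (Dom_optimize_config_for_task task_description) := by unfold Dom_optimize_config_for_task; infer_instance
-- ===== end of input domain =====

-- B replaces A's rule-driven if/elif chain of substring searches by a single left-to-right
-- sweep over the lowered text keeping the minimum-priority keyword match (alternative algorithm, same cost).


-- ===== PORT A =====
def optimize_config_for_task (task_description : String) : String :=
  let task_lower := PySem.Str.lower task_description
  if ["fast", "quick", "speed", "batch", "bulk"].any (fun keyword => PySem.Str.isIn keyword task_lower) then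
    "fast_automation"
  else if ["stealth", "undetected", "bypass", "avoid detection"].any (fun keyword => PySem.Str.isIn keyword task_lower) then
    "stealth_automation"
  else if ["scrape", "extract", "collect", "harvest", "data"].any (fun keyword => PySem.Str.isIn keyword task_lower) then
    "data_extraction"
  else if ["form", "fill", "submit", "register", "signup"].any (fun keyword => PySem.Str.isIn keyword task_lower) then
    "form_automation"
  else if ["buy", "shop", "product", "cart", "price"].any (fun keyword => PySem.Str.isIn keyword task_lower) then
    "ecommerce_automation"
  else if ["social", "post", "tweet", "facebook", "instagram"].any (fun keyword => PySem.Str.isIn keyword task_lower) then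
    "social_media_automation"
  else if ["test", "verify", "check", "validate", "qa"].any (fun keyword => PySem.Str.isIn keyword task_lower) then
    "testing_automation"
  else
    "visual_automation"

-- ===== PORT B =====
-- config table indexed by rule priority
def pvConfigs : List String :=
  ["fast_automation", "stealth_automation", "data_extraction", "form_automation",
   "ecommerce_automation", "social_media_automation", "testing_automation"]

-- flat keyword table: (keyword, rule index)
def pvKw : List (String × Nat) :=
  [("fast", 0), ("quick", 0), ("speed", 0), ("batch", 0), ("bulk", 0),
   ("stealth", 1), ("undetected", 1), ("bypass", 1), ("avoid detection", 1),
   ("scrape", 2), ("extract", 2), ("collect", 2), ("harvest", 2), ("data", 2),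
   ("form", 3), ("fill", 3), ("submit", 3), ("register", 3), ("signup", 3),
   ("buy", 4), ("shop", 4), ("product", 4), ("cart", 4), ("price", 4),
   ("social", 5), ("post", 5), ("tweet", 5), ("facebook", 5), ("instagram", 5),
   ("test", 6), ("verify", 6), ("check", 6), ("validate", 6), ("qa", 6)]

-- the sweep: 'for pos in range(len(t))' walks the suffixes of the text; at each position
-- the inner loop checks 't.startswith(kw, pos)' (= the keyword is a prefix of that suffix)
def pvScan : List Char → Nat → Nat
  | [], best => best
  | c :: rest, best =>
      pvScan rest (pvKw.foldl (fun b r => if r.1.toList.isPrefixOf (c :: rest) then min b r.2 else b) best)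

def optimize_config_for_task_alt (task_description : String) : String :=
  let task_lower := PySem.Str.lower task_description
  let best := pvScan task_lower.toList 7
  if best < 7 then pvConfigs.getD best "visual_automation" else "visual_automation"

-- ===== PRECONDITION & SPEC =====
def Spec_optimize_config_for_task (task_description : String) (out : String) : Prop := out = optimize_config_for_task_alt task_description
instance (task_description : String) (out : String) : Decidable (Spec_optimize_config_for_task task_description out) := by unfold Spec_optimize_config_for_task; infer_instance

-- ===== CLAIM (what is proved, stated in full; the proofs are below) =====
def Claim_equal_optimize_config_for_task : Prop := ∀ (task_description : String), Dom_optimize_config_for_task task_description → Spec_optimize_config_for_task task_description (optimize_config_for_task task_description)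

-- ===== LEMMAS AND PROOFS =====

-- abstract sweep step: update the running best index by rule r when cond r fires
def pvStep (cond : String × Nat → Bool) (b : Nat) (r : String × Nat) : Nat :=
  if cond r then min b r.2 else b

lemma pvStep_comm (c1 c2 : String × Nat → Bool) (x y : String × Nat) (b : Nat) :
    pvStep c1 (pvStep c2 b y) x = pvStep c2 (pvStep c1 b x) y := by
  unfold pvStep; split_ifs <;> omega

lemma pvStep_foldl_comm (c1 c2 : String × Nat → Bool) (l : List (String × Nat)) (x : String × Nat) (b : Nat) :
    pvStep c1 (l.foldl (pvStep c2) b) x = l.foldl (pvStep c2) (pvStep c1 b x) := by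
  induction l generalizing b with
  | nil => rfl
  | cons y ys ih => simp only [List.foldl_cons, ih, pvStep_comm]

lemma pvFoldl_or (p q r : String × Nat → Bool) (l : List (String × Nat))
    (h : ∀ x ∈ l, p x = (q x || r x)) (b : Nat) :
    l.foldl (pvStep r) (l.foldl (pvStep q) b) = l.foldl (pvStep p) b := by
  induction l generalizing b with
  | nil => rfl
  | cons x xs ih =>
      simp only [List.foldl_cons]
      rw [pvStep_foldl_comm]
      have hx : pvStep r (pvStep q b x) x = pvStep p b x := by
        have hpx := h x (by simp)
        unfold pvStep; rw [hpx]; split_ifs <;> simp_all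
      rw [hx]
      exact ih (fun y hy => h y (by simp [hy])) _

lemma isIn_cons (kw : List Char) (c : Char) (r : List Char) :
    PySem.Chars.isIn kw (c :: r) = (kw.isPrefixOf (c :: r) || PySem.Chars.isIn kw r) := by
  rw [Bool.eq_iff_iff]
  simp [List.isPrefixOf_iff_prefix, PySem.Chars.isIn_iff_infix, List.infix_cons_iff]

lemma pvFoldl_id (c : String × Nat → Bool) (l : List (String × Nat)) (b : Nat)
    (h : ∀ x ∈ l, c x = false) : l.foldl (pvStep c) b = b := by
  induction l generalizing b with
  | nil => rfl
  | cons x xs ih =>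
      simp only [List.foldl_cons]
      have hx := h x (by simp)
      rw [show pvStep c b x = b from by unfold pvStep; rw [hx]; rfl]
      exact ih b (fun y hy => h y (List.mem_cons_of_mem x hy))

lemma pvScan_eq_chars (tl : List Char) (b : Nat) :
    pvScan tl b = pvKw.foldl (pvStep (fun r => PySem.Chars.isIn r.1.toList tl)) b := by
  induction tl generalizing b with
  | nil =>
      rw [pvScan, pvFoldl_id _ _ _ (by decide)]
  | cons c rest ih =>
      rw [pvScan]
      have hfold : (pvKw.foldl (fun b r => if r.1.toList.isPrefixOf (c :: rest) then min b r.2 else b) b)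
          = pvKw.foldl (pvStep (fun r => r.1.toList.isPrefixOf (c :: rest))) b := rfl
      rw [hfold, ih]
      exact pvFoldl_or _ (fun r => r.1.toList.isPrefixOf (c :: rest))
        (fun r => PySem.Chars.isIn r.1.toList rest) pvKw
        (fun x _ => isIn_cons x.1.toList c rest) b

-- the whole-string condition B's sweep computes, at String level (defeq to the Chars one)
def pvCondIn (s : String) (r : String × Nat) : Bool := PySem.Str.isIn r.1 s

lemma pvScan_eq (s : String) (b : Nat) :
    pvScan s.toList b = pvKw.foldl (pvStep (pvCondIn s)) b :=
  pvScan_eq_chars s.toList b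

lemma pvFoldl_le_init (c : String × Nat → Bool) (l : List (String × Nat)) (b : Nat) :
    l.foldl (pvStep c) b ≤ b := by
  induction l generalizing b with
  | nil => simp
  | cons x xs ih =>
      simp only [List.foldl_cons]
      calc xs.foldl (pvStep c) (pvStep c b x) ≤ pvStep c b x := ih _
        _ ≤ b := by unfold pvStep; split_ifs <;> omega

lemma pvFoldl_le_mem (c : String × Nat → Bool) (l : List (String × Nat)) (b : Nat)
    (r : String × Nat) (hr : r ∈ l) (hc : c r = true) :
    l.foldl (pvStep c) b ≤ r.2 := by
  induction l generalizing b with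
  | nil => cases hr
  | cons x xs ih =>
      simp only [List.foldl_cons]
      rcases List.mem_cons.mp hr with h | h
      · subst h
        calc xs.foldl (pvStep c) (pvStep c b r) ≤ pvStep c b r := pvFoldl_le_init ..
          _ ≤ r.2 := by unfold pvStep; simp [hc]
      · exact ih _ h

lemma pvFoldl_ge (c : String × Nat → Bool) (l : List (String × Nat)) (b j : Nat)
    (hb : j ≤ b) (h : ∀ r ∈ l, c r = true → j ≤ r.2) :
    j ≤ l.foldl (pvStep c) b := by
  induction l generalizing b with
  | nil => simpa
  | cons x xs ih =>
      simp only [List.foldl_cons]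
      refine ih _ ?_ (fun y hy hc => h y (by simp [hy]) hc)
      have hx := h x (by simp)
      unfold pvStep; split_ifs with hcx
      · have := hx hcx; omega
      · exact hb

lemma pvBest_eq (s : String) (j : Nat) (hj : j ≤ 7)
    (hup : ∃ r ∈ pvKw, pvCondIn s r = true ∧ r.2 = j)
    (hlo : ∀ x ∈ pvKw, pvCondIn s x = true → j ≤ x.2) :
    pvKw.foldl (pvStep (pvCondIn s)) 7 = j := by
  obtain ⟨r, hr, hc, h2⟩ := hup
  exact Nat.le_antisymm (h2 ▸ pvFoldl_le_mem _ _ _ r hr hc) (pvFoldl_ge _ _ _ _ hj hlo)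

lemma pvBest_none (s : String) (h : ∀ x ∈ pvKw, pvCondIn s x = false) :
    pvKw.foldl (pvStep (pvCondIn s)) 7 = 7 :=
  Nat.le_antisymm (pvFoldl_le_init ..)
    (pvFoldl_ge _ _ _ _ (le_refl 7) (fun x hx hc => by rw [h x hx] at hc; cases hc))

-- ===== VERDICT (by name: the statement is the Claim_ definition above) =====
set_option maxHeartbeats 2000000 in
theorem optimize_config_for_task_spec : Claim_equal_optimize_config_for_task := by
  intro t _
  unfold Spec_optimize_config_for_task optimize_config_for_task optimize_config_for_task_alt
  simp only []
  rw [pvScan_eq]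
  rw [show (if List.foldl (pvStep (pvCondIn (PySem.Str.lower t))) 7 pvKw < 7 then
        pvConfigs.getD (List.foldl (pvStep (pvCondIn (PySem.Str.lower t))) 7 pvKw) "visual_automation"
      else "visual_automation")
      = pvConfigs.getD (List.foldl (pvStep (pvCondIn (PySem.Str.lower t))) 7 pvKw) "visual_automation" from by
    split_ifs with hlt
    · rfl
    · rw [List.getD_eq_default _ _ (by simp [pvConfigs]; omega)]]
  simp only [List.any_cons, List.any_nil, Bool.or_false, Bool.or_eq_true]
  split_ifs with h1 h2 h3 h4 h5 h6 h7
  · rw [pvBest_eq (PySem.Str.lower t) 0 (by omega)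
        (by rcases h1 with h|h|h|h|h
            exacts [⟨("fast",0), by decide, h, rfl⟩,
                    ⟨("quick",0), by decide, h, rfl⟩,
                    ⟨("speed",0), by decide, h, rfl⟩,
                    ⟨("batch",0), by decide, h, rfl⟩,
                    ⟨("bulk",0), by decide, h, rfl⟩])
        (by intro x hx hc
            simp only [pvCondIn] at hc
            unfold pvKw at hx
            fin_cases hx <;> first | omega | simp_all)]
    decide
  · rw [pvBest_eq (PySem.Str.lower t) 1 (by omega)
        (by rcases h2 with h|h|h|h
            exacts [⟨("stealth",1), by decide, h, rfl⟩,
                    ⟨("undetected",1), by decide, h, rfl⟩,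
                    ⟨("bypass",1), by decide, h, rfl⟩,
                    ⟨("avoid detection",1), by decide, h, rfl⟩])
        (by intro x hx hc
            simp only [pvCondIn] at hc
            unfold pvKw at hx
            fin_cases hx <;> first | omega | simp_all)]
    decide
  · rw [pvBest_eq (PySem.Str.lower t) 2 (by omega)
        (by rcases h3 with h|h|h|h|h
            exacts [⟨("scrape",2), by decide, h, rfl⟩,
                    ⟨("extract",2), by decide, h, rfl⟩,
                    ⟨("collect",2), by decide, h, rfl⟩,
                    ⟨("harvest",2), by decide, h, rfl⟩,
                    ⟨("data",2), by decide, h, rfl⟩])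
        (by intro x hx hc
            simp only [pvCondIn] at hc
            unfold pvKw at hx
            fin_cases hx <;> first | omega | simp_all)]
    decide
  · rw [pvBest_eq (PySem.Str.lower t) 3 (by omega)
        (by rcases h4 with h|h|h|h|h
            exacts [⟨("form",3), by decide, h, rfl⟩,
                    ⟨("fill",3), by decide, h, rfl⟩,
                    ⟨("submit",3), by decide, h, rfl⟩,
                    ⟨("register",3), by decide, h, rfl⟩,
                    ⟨("signup",3), by decide, h, rfl⟩])
        (by intro x hx hc
            simp only [pvCondIn] at hc
            unfold pvKw at hx
            fin_cases hx <;> first | omega | simp_all)]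
    decide
  · rw [pvBest_eq (PySem.Str.lower t) 4 (by omega)
        (by rcases h5 with h|h|h|h|h
            exacts [⟨("buy",4), by decide, h, rfl⟩,
                    ⟨("shop",4), by decide, h, rfl⟩,
                    ⟨("product",4), by decide, h, rfl⟩,
                    ⟨("cart",4), by decide, h, rfl⟩,
                    ⟨("price",4), by decide, h, rfl⟩])
        (by intro x hx hc
            simp only [pvCondIn] at hc
            unfold pvKw at hx
            fin_cases hx <;> first | omega | simp_all)]
    decide
  · rw [pvBest_eq (PySem.Str.lower t) 5 (by omega)
        (by rcases h6 with h|h|h|h|h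
            exacts [⟨("social",5), by decide, h, rfl⟩,
                    ⟨("post",5), by decide, h, rfl⟩,
                    ⟨("tweet",5), by decide, h, rfl⟩,
                    ⟨("facebook",5), by decide, h, rfl⟩,
                    ⟨("instagram",5), by decide, h, rfl⟩])
        (by intro x hx hc
            simp only [pvCondIn] at hc
            unfold pvKw at hx
            fin_cases hx <;> first | omega | simp_all)]
    decide
  · rw [pvBest_eq (PySem.Str.lower t) 6 (by omega)
        (by rcases h7 with h|h|h|h|h
            exacts [⟨("test",6), by decide, h, rfl⟩,
                    ⟨("verify",6), by decide, h, rfl⟩,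
                    ⟨("check",6), by decide, h, rfl⟩,
                    ⟨("validate",6), by decide, h, rfl⟩,
                    ⟨("qa",6), by decide, h, rfl⟩])
        (by intro x hx hc
            simp only [pvCondIn] at hc
            unfold pvKw at hx
            fin_cases hx <;> first | omega | simp_all)]
    decide
  · rw [pvBest_none (PySem.Str.lower t)
        (by intro x hx
            simp only [pvCondIn]
            unfold pvKw at hx
            fin_cases hx <;> simp_all)]
    decide
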